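-- pv_equiv track=rewrite | github.com/johnmathews/journal-agent | src/journal/providers/extraction.py | _repair_canonical_name
-- ===== SOURCE A (Python) =====
-- _PUNCT_TO_STRIP = ",.;:!?\"'()[]{}"
--
-- _INFLECTION_SUFFIXES = ("'s", "s'", "s")
--
-- def _is_inflection_of(name_lower: str, token_lower: str) -> bool:
--     """True if ``token_lower`` is just an inflected form of ``name_lower``
--     (possessive or plural). Used both to trust the canonical when the
--     token is its inflected form, and to reject inflected forms as
--     repair candidates."""
--     if not token_lower.startswith(name_lower):
--         return False
--     extra = token_lower[len(name_lower):]
--     return extra in _INFLECTION_SUFFIXES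
--
-- def _repair_canonical_name(
--     canonical_name: str, quote: str,
-- ) -> tuple[str, bool]:
--     """Defend against LLM-clipped ``canonical_name`` values.
--
--     Returns ``(repaired_name, was_repaired)``.
--
--     The model occasionally returns a ``canonical_name`` that is one or
--     two characters shorter than the form actually in the source text
--     — e.g. ``"Nautilin"`` for a quote ``"Nautiline, the iOS app..."``.
--     Operates at the token level (a naive substring check is not enough:
--     the clipped name is itself a substring of the longer token).
--
--     Trust rules — if any of these match, the LLM had it right:
--
--     1. Some whitespace-separated token in ``quote`` (after stripping
--        surrounding punctuation) **equals** ``canonical_name``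
--        case-insensitively. Protects deliberate short canonicals like
--        ``"Bob"`` for a quote ``"Robert 'Bob' Smith"``.
--     2. Some token is an inflection of ``canonical_name`` — the same
--        name with a possessive (``'s``, ``s'``) or plural (``s``)
--        suffix. The LLM picked the bare canonical and was right; the
--        longer form is just an inflected reference. This is the common
--        case for proper nouns and prevents false repairs like
--        ``"Hermione" -> "Hermione's"`` or ``"Daniel" -> "Daniels"``.
--
--     Repair rule:
--
--     3. Otherwise, if ``canonical_name`` is a strict prefix of some
--        longer token in the quote AND the extra characters are not an
--        inflection suffix, return that longer token. Catches clipped-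
--        trailing-character LLM bugs (``"Nautilin"`` -> ``"Nautiline"``)
--        without false-positive-ing on inflections.
--
--     Anything else is left alone with a warning logged by the caller.
--     Returned token preserves the original casing from the quote.
--     """
--     if not canonical_name or not quote:
--         return canonical_name, False
--
--     name_lower = canonical_name.lower()
--     repair_candidate: str | None = None
--     for raw_token in quote.split():
--         token = raw_token.strip(_PUNCT_TO_STRIP)
--         if not token:
--             continue
--         token_lower = token.lower()
--         if token_lower == name_lower:
--             # canonical_name is genuinely present as a token.
--             return canonical_name, False
--         if _is_inflection_of(name_lower, token_lower):
--             # Token is "<canonical>'s" / "<canonical>s'" / "<canonical>s".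
--             # The LLM correctly picked the bare canonical.
--             return canonical_name, False
--         if (
--             len(token) > len(canonical_name)
--             and token_lower.startswith(name_lower)
--             and repair_candidate is None
--         ):
--             repair_candidate = token
--
--     if repair_candidate is not None:
--         return repair_candidate, True
--     return canonical_name, False
-- ===== SOURCE B (Python) =====
-- _PUNCT_TO_STRIP = ",.;:!?\"'()[]{}"
--
-- _INFLECTION_SUFFIXES = ("'s", "s'", "s")
--
--
-- def _is_inflection_of(name_lower: str, token_lower: str) -> bool:
--     if not token_lower.startswith(name_lower):
--         return False
--     return token_lower[len(name_lower):] in _INFLECTION_SUFFIXES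
--
--
-- def _repair_canonical_name(canonical_name: str, quote: str) -> tuple[str, bool]:
--     if not canonical_name or not quote:
--         return canonical_name, False
--
--     name_lower = canonical_name.lower()
--     tokens = [t for t in (raw.strip(_PUNCT_TO_STRIP) for raw in quote.split()) if t]
--
--     # Pass 1: any token that IS the canonical (or an inflection of it) means trust.
--     if any(
--         t.lower() == name_lower or _is_inflection_of(name_lower, t.lower())
--         for t in tokens
--     ):
--         return canonical_name, False
--
--     # Pass 2: first strictly-longer token extending the name non-inflectionally.
--     repaired = next(
--         (
--             t
--             for t in tokens
--             if len(t) > len(canonical_name)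
--             and t.lower().startswith(name_lower)
--             and not _is_inflection_of(name_lower, t.lower())
--         ),
--         None,
--     )
--     if repaired is not None:
--         return repaired, True
--     return canonical_name, False
-- ===== Notes on version B (the rewrite author's own statement) =====
-- stated objective: simpler
-- what changed: Replaces A's single loop with early returns and a first-candidate accumulator by a declarative decomposition: build the stripped non-empty token list once, then one 'any' pass for trust matches and one 'next' pass for the first repair candidate.
import Mathlib
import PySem

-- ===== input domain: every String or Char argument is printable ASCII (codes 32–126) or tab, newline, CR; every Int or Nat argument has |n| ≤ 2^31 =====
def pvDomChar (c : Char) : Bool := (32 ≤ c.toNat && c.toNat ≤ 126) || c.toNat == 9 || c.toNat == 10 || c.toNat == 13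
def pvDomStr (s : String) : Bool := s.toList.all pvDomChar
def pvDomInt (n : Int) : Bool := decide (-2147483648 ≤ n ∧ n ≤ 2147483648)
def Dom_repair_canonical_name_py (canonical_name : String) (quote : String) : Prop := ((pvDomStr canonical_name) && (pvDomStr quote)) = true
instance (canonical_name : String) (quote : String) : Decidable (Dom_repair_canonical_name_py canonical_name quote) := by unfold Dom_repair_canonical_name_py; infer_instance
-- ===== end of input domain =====

-- ===== PORT A =====
-- B changes only the control decomposition (one accumulator loop -> two passes); return value proven equal.
def pvPunct : List Char := ",.;:!?\"'()[]{}".toList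

def pvIsInflectionOf (name_lower : List Char) (token_lower : List Char) : Bool :=
  if PySem.Chars.startswith token_lower name_lower then
    (token_lower.drop name_lower.length == '\'' :: 's' :: []) ||
    (token_lower.drop name_lower.length == 's' :: '\'' :: []) ||
    (token_lower.drop name_lower.length == ['s'])
  else false

-- A's loop: early returns on trust, first repair candidate kept in `cand`.
def pvLoopA (canonical_name : String) (name_lower : List Char)
    (tokens : List (List Char)) (cand : Option (List Char)) : String × Bool :=
  match tokens with
  | [] =>
    match cand with
    | some c => (String.mk c, true)
    | none => (canonical_name, false)
  | raw :: rest =>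
    let token := PySem.Chars.stripChars raw pvPunct
    if token == [] then pvLoopA canonical_name name_lower rest cand
    else
      let token_lower := PySem.Chars.lower token
      if token_lower == name_lower then (canonical_name, false)
      else if pvIsInflectionOf name_lower token_lower then (canonical_name, false)
      else if token.length > canonical_name.toList.length && PySem.Chars.startswith token_lower name_lower && cand == none then
        pvLoopA canonical_name name_lower rest (some token)
      else pvLoopA canonical_name name_lower rest cand

def repair_canonical_name_py (canonical_name : String) (quote : String) : String × Bool :=
  if canonical_name.toList == [] || quote.toList == [] then (canonical_name, false)
  else
    pvLoopA canonical_name (PySem.Chars.lower canonical_name.toList)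
      ((PySem.Str.split₀ quote).map (fun r => r.toList)) none

-- ===== PORT B =====
def pvTrust (name_lower : List Char) (t : List Char) : Bool :=
  PySem.Chars.lower t == name_lower || pvIsInflectionOf name_lower (PySem.Chars.lower t)

def pvRepairCand (canonical_name : String) (name_lower : List Char) (t : List Char) : Bool :=
  decide (t.length > canonical_name.toList.length) &&
    PySem.Chars.startswith (PySem.Chars.lower t) name_lower &&
    !pvIsInflectionOf name_lower (PySem.Chars.lower t)

def repair_canonical_name_py_alt (canonical_name : String) (quote : String) : String × Bool :=
  if canonical_name.toList == [] || quote.toList == [] then (canonical_name, false)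
  else
    let name_lower := PySem.Chars.lower canonical_name.toList
    let tokens := (((PySem.Str.split₀ quote).map (fun r => PySem.Chars.stripChars r.toList pvPunct)).filter (fun t => !(t == [])))
    if tokens.any (pvTrust name_lower) then (canonical_name, false)
    else
      match tokens.find? (pvRepairCand canonical_name name_lower) with
      | some t => (String.mk t, true)
      | none => (canonical_name, false)

-- ===== PRECONDITION & SPEC =====
def Spec_repair_canonical_name_py (canonical_name : String) (quote : String) (out : String × Bool) : Prop := out = repair_canonical_name_py_alt canonical_name quote
instance (canonical_name : String) (quote : String) (out : String × Bool) : Decidable (Spec_repair_canonical_name_py canonical_name quote out) := by unfold Spec_repair_canonical_name_py; infer_instance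

-- ===== CLAIM (what is proved, stated in full; the proofs are below) =====
def Claim_equal_repair_canonical_name_py : Prop := ∀ (canonical_name : String) (quote : String), Dom_repair_canonical_name_py canonical_name quote → Spec_repair_canonical_name_py canonical_name quote (repair_canonical_name_py canonical_name quote)

-- ===== LEMMAS AND PROOFS =====
-- Proof-only helper: the two-pass reading of A's loop state.
def pvRhs (cn : String) (nl : List Char) (toks : List (List Char)) (c : Option (List Char)) : String × Bool :=
  if toks.any (pvTrust nl) then (cn, false)
  else
    match c with
    | some u => (String.mk u, true)
    | none =>
      match toks.find? (pvRepairCand cn nl) with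
      | some t => (String.mk t, true)
      | none => (cn, false)

-- A's loop computes the two-pass value over the stripped non-empty tokens.
lemma pvLoopA_eq (cn : String) (nl : List Char) :
    ∀ (ts : List (List Char)) (c : Option (List Char)),
      pvLoopA cn nl ts c =
        pvRhs cn nl ((ts.map (fun r => PySem.Chars.stripChars r pvPunct)).filter (fun t => !(t == []))) c := by
  intro ts
  induction ts with
  | nil => intro c; cases c <;> rfl
  | cons raw rest ih =>
    intro c
    simp only [pvLoopA, List.map_cons]
    by_cases h0 : (PySem.Chars.stripChars raw pvPunct == []) = true
    · rw [if_pos h0, List.filter_cons_of_neg (by simp [h0]), ih c]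
    · rw [if_neg h0, List.filter_cons_of_pos (by simp at h0 ⊢; exact h0)]
      by_cases heq : (PySem.Chars.lower (PySem.Chars.stripChars raw pvPunct) == nl) = true
      · have htr : pvTrust nl (PySem.Chars.stripChars raw pvPunct) = true := by
          simp [pvTrust]; left; simpa using heq
        rw [if_pos heq]
        simp [pvRhs, htr]
      · rw [if_neg heq]
        by_cases hinf : pvIsInflectionOf nl (PySem.Chars.lower (PySem.Chars.stripChars raw pvPunct)) = true
        · have htr : pvTrust nl (PySem.Chars.stripChars raw pvPunct) = true := by
            simp [pvTrust, hinf]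
          rw [if_pos hinf]
          simp [pvRhs, htr]
        · have htr : pvTrust nl (PySem.Chars.stripChars raw pvPunct) = false := by
            simp [pvTrust, hinf]; simpa using heq
          rw [if_neg hinf]
          cases c with
          | some u =>
            have hfalse : (decide ((PySem.Chars.stripChars raw pvPunct).length > cn.toList.length) &&
                PySem.Chars.startswith (PySem.Chars.lower (PySem.Chars.stripChars raw pvPunct)) nl &&
                ((some u : Option (List Char)) == none)) = false := by simp
            rw [hfalse, if_neg (by simp), ih (some u)]
            simp only [pvRhs, List.any_cons, htr, Bool.false_or]
          | none =>
            by_cases hc : (decide ((PySem.Chars.stripChars raw pvPunct).length > cn.toList.length) &&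
                PySem.Chars.startswith (PySem.Chars.lower (PySem.Chars.stripChars raw pvPunct)) nl) = true
            · have hcand : pvRepairCand cn nl (PySem.Chars.stripChars raw pvPunct) = true := by
                have hinf' : (!pvIsInflectionOf nl (PySem.Chars.lower (PySem.Chars.stripChars raw pvPunct))) = true := by
                  simp [hinf]
                simp only [pvRepairCand]
                rw [hc, hinf']; rfl
              rw [show ((none : Option (List Char)) == none) = true from rfl, Bool.and_true, if_pos hc,
                ih (some (PySem.Chars.stripChars raw pvPunct))]
              simp only [pvRhs, List.any_cons, htr, Bool.false_or, List.find?_cons_of_pos hcand]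
            · have hc' : (decide ((PySem.Chars.stripChars raw pvPunct).length > cn.toList.length) &&
                  PySem.Chars.startswith (PySem.Chars.lower (PySem.Chars.stripChars raw pvPunct)) nl) = false :=
                Bool.eq_false_iff.mpr hc
              have hcand : pvRepairCand cn nl (PySem.Chars.stripChars raw pvPunct) = false := by
                simp only [pvRepairCand] at hc' ⊢
                rw [hc', Bool.false_and]
              have hfind : List.find? (pvRepairCand cn nl)
                  (PySem.Chars.stripChars raw pvPunct ::
                    List.filter (fun t => !(t == [])) (List.map (fun r => PySem.Chars.stripChars r pvPunct) rest)) =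
                  List.find? (pvRepairCand cn nl)
                    (List.filter (fun t => !(t == [])) (List.map (fun r => PySem.Chars.stripChars r pvPunct) rest)) :=
                List.find?_cons_of_neg (by simp [hcand])
              rw [show ((none : Option (List Char)) == none) = true from rfl, Bool.and_true, if_neg hc, ih none]
              simp only [pvRhs, List.any_cons, htr, Bool.false_or, hfind]

-- ===== VERDICT (by name: the statement is the Claim_ definition above) =====
theorem repair_canonical_name_py_spec : Claim_equal_repair_canonical_name_py := by
  intro canonical_name quote _
  unfold Spec_repair_canonical_name_py repair_canonical_name_py repair_canonical_name_py_alt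
  by_cases hg : (canonical_name.toList == [] || quote.toList == []) = true
  · rw [if_pos hg, if_pos hg]
  · rw [if_neg hg, if_neg hg, pvLoopA_eq, List.map_map]
    simp only [pvRhs, Function.comp_def]
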